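-- pv_equiv track=rewrite | github.com/nadakhelif/CP-Problems | RandomProblems/brokenkey.py | canWrite
-- ===== SOURCE A (Python) =====
-- def canWrite(mot,brokenKey):
--     i=0
--     while(i<len(mot)):
--         if mot[i] in brokenKey :
--             return False
--         else :
--             i+=1
--     if i==len(mot) :
--         return True
-- ===== SOURCE B (Python) =====
-- def canWrite(mot, brokenKey):
--     counts = {}
--     for c in mot:
--         counts[c] = counts.get(c, 0) + 1
--     total = 0
--     for k in brokenKey:
--         total += counts.get(k, 0)
--     return total == 0
-- ===== Notes on version B (the rewrite author's own statement) =====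
-- stated objective: alternative
-- what changed: Instead of scanning mot with an early-return membership test against brokenKey, B builds a character-count dictionary of mot in one pass and then sums the counts looked up for each broken key, returning whether that sum is zero; the inner scan and the short-circuit disappear.
import Mathlib
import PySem

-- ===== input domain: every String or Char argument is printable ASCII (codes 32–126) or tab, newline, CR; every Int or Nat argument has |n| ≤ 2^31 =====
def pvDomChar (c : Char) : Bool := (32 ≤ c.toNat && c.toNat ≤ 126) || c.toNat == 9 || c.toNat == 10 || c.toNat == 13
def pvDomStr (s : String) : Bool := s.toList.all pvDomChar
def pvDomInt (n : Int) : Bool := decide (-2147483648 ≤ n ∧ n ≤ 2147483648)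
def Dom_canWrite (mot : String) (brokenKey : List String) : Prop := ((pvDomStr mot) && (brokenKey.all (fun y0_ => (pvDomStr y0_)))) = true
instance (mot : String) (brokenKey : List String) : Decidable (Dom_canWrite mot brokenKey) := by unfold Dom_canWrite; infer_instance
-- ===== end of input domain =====

-- B replaces A's early-return membership scan by a counting pass: build a character-count
-- dictionary of mot, then sum the counts of the broken keys and test the sum for zero
-- (objective: alternative; removes the inner membership scan).

-- ===== PORT A =====
-- the while loop over index i, with the early 'return False' on a broken character
def canWriteGo (mot : List Char) (brokenKey : List String) (i : Nat) : Bool :=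
  if h : i < mot.length then
    if brokenKey.contains (String.mk [mot[i]]) then false
    else canWriteGo mot brokenKey (i + 1)
  else true
termination_by mot.length - i

def canWrite (mot : String) (brokenKey : List String) : Bool :=
  canWriteGo mot.toList brokenKey 0

-- ===== PORT B =====
def canWrite_alt (mot : String) (brokenKey : List String) : Bool :=
  -- for c in mot: counts[c] = counts.get(c, 0) + 1   (c is a 1-char string)
  let counts : PySem.Dict String Int :=
    (mot.toList.map (fun c => String.mk [c])).foldl
      (fun d c => d.insert c (d.getD c 0 + 1)) PySem.Dict.empty
  -- total = 0; for k in brokenKey: total += counts.get(k, 0)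
  let total : Int := brokenKey.foldl (fun t k => t + counts.getD k 0) 0
  total == 0

-- ===== PRECONDITION & SPEC =====
def Spec_canWrite (mot : String) (brokenKey : List String) (out : Bool) : Prop := out = canWrite_alt mot brokenKey
instance (mot : String) (brokenKey : List String) (out : Bool) : Decidable (Spec_canWrite mot brokenKey out) := by unfold Spec_canWrite; infer_instance

-- ===== CLAIM (what is proved, stated in full; the proofs are below) =====
def Claim_equal_canWrite : Prop := ∀ (mot : String) (brokenKey : List String), Dom_canWrite mot brokenKey → Spec_canWrite mot brokenKey (canWrite mot brokenKey)

-- ===== LEMMAS AND PROOFS =====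
theorem canWriteGo_eq_all (mot : List Char) (brokenKey : List String) (i : Nat) :
    canWriteGo mot brokenKey i
      = (mot.drop i).all (fun c => !brokenKey.contains (String.mk [c])) := by
  fun_induction canWriteGo mot brokenKey i with
  | case1 i h hb =>
      rw [List.drop_eq_getElem_cons h]
      simp at hb ⊢
      refine ⟨mot[i], ?_, hb⟩
      rw [List.drop_eq_getElem_cons h]
      exact List.mem_cons_self
  | case2 i h hb ih =>
      simp at hb
      rw [ih, List.drop_eq_getElem_cons h, List.all_cons]
      simp [hb]
  | case3 i h =>
      rw [List.drop_eq_nil_of_le (by omega)]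
      simp

theorem sum_counts_eq_zero (strs brokenKey : List String) :
    (brokenKey.foldl (fun t k => t + (strs.count k : Int)) 0 == 0)
      = strs.all (fun s => !brokenKey.contains s) := by
  rw [PySem.List.foldl_add (g := fun k => (strs.count k : Int))]
  rw [Bool.eq_iff_iff]
  simp only [zero_add, beq_iff_eq, List.all_eq_true, Bool.not_eq_eq_eq_not, Bool.not_true,
    List.contains_eq_mem, decide_eq_false_iff_not]
  constructor
  · intro hsum s hs hmem
    have hle : (strs.count s : Int) ≤ (brokenKey.map (fun k => (strs.count k : Int))).sum :=
      List.single_le_sum (by intro x hx; simp only [List.mem_map] at hx; obtain ⟨k, -, rfl⟩ := hx; positivity) _ (List.mem_map_of_mem hmem)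
    have : 0 < strs.count s := List.count_pos_iff.mpr hs
    omega
  · intro h
    apply List.sum_eq_zero
    intro x hx
    simp only [List.mem_map] at hx
    obtain ⟨k, hk, rfl⟩ := hx
    have : strs.count k = 0 := by
      rw [List.count_eq_zero]
      intro hks
      exact h k hks hk
    simp [this]

-- ===== VERDICT (by name: the statement is the Claim_ definition above) =====
theorem canWrite_spec : Claim_equal_canWrite := by
  intro mot brokenKey _
  show canWrite mot brokenKey = canWrite_alt mot brokenKey
  rw [canWrite, canWriteGo_eq_all, List.drop_zero, canWrite_alt]
  simp only [PySem.Dict.getD_foldl_insert_add_one, PySem.Dict.getD_empty, zero_add]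
  rw [sum_counts_eq_zero]
  rw [List.all_map]
  rfl
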